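-- pv_equiv track=rewrite | github.com/ramge132/SSAFY_Daejeon_Algorithm | happypildo/Aug_2nd_week/[BOJ]_S4_한수_1065.py | count_number_of_perms
-- ===== SOURCE A (Python) =====
-- def count_number_of_perms(current_str, step_size, N):
--     if int(current_str) > N:
--         return 0
--
--     ret = 1
--
--     new = str(int(current_str[-1]) + step_size)
--     if int(new) > 9:
--         return ret
--     elif int(new) < 0:
--         return ret
--     else:
--         return ret + count_number_of_perms(current_str+new, step_size, N)
-- ===== SOURCE B (Python) =====
-- def _build_chain(s, step_size, N):
--     """Phase 1: the list of successive digit-appended strings, regardless of how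
--     many of them are still <= N (generation stops once the value passes N)."""
--     if int(s) > N:
--         return [s]
--     new = str(int(s[-1]) + step_size)
--     if int(new) > 9 or int(new) < 0:
--         return [s]
--     return [s] + _build_chain(s + new, step_size, N)
--
-- def count_number_of_perms(current_str, step_size, N):
--     chain = _build_chain(current_str, step_size, N)
--     return sum(1 for t in chain if int(t) <= N)
-- ===== Notes on version B (the rewrite author's own statement) =====
-- stated objective: alternative
-- what changed: Replaced A's counting recursion (each call returns 1 + recursive count) by a two-stage pipeline: a recursive generator that builds the list of successive digit-appended strings, then a separate pass counting the chain elements whose integer value is <= N.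
import Mathlib
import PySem

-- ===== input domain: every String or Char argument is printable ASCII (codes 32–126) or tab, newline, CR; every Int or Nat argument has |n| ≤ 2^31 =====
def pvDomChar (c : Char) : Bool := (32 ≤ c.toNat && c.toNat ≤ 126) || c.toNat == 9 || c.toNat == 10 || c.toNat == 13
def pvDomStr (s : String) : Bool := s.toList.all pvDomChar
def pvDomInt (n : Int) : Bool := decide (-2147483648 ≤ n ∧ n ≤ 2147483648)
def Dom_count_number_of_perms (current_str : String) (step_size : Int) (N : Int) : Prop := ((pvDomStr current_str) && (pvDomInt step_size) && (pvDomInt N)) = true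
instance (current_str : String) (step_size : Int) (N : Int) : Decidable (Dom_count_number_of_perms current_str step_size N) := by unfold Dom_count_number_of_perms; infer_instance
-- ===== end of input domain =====

-- B replaces A's counting recursion by a two-stage pipeline: a recursive generator that builds
-- the list of successive digit-appended strings, then a separate pass counting those with int ≤ N
-- (objective: alternative decomposition, same cost).


-- ===== PORT A =====
-- Fuel-bounded transliteration of A's recursion; 64 fuel exceeds the recursion depth on
-- every input admitted by Pre_ (the value grows tenfold per append, or the digit escapes
-- 0..9 within 10 steps).  `none` branches of the `?`-primitives are where Python raises.
def pvCountA : Nat → String → Int → Int → Int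
  | 0, _, _, _ => 0
  | fuel+1, s, step, N =>
    match PySem.Int.ofStr? s with
    | none => 0                                   -- int(current_str) raises
    | some v =>
      if v > N then 0
      else
        -- ret = 1
        match PySem.Str.pyGet? s (-1) with
        | none => 1                               -- current_str[-1] raises
        | some c =>
          match PySem.Int.ofChars? [c] with
          | none => 1                             -- int(current_str[-1]) raises
          | some d =>
            let newS := PySem.Int.toStr (d + step)
            match PySem.Int.ofStr? newS with
            | none => 1                           -- unreachable: int(str(x)) never raises
            | some nd =>
              if nd > 9 then 1
              else if nd < 0 then 1
              else 1 + pvCountA fuel (s ++ newS) step N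

def count_number_of_perms (current_str : String) (step_size : Int) (N : Int) : Int :=
  pvCountA 64 current_str step_size N

-- ===== PORT B =====
-- Phase 1 of Source B: _build_chain, the recursive generator of the successive strings.
-- Same fuel bound 64 (fuel 0, returning [], is unreachable for admitted inputs);
-- the first argument of each Option.elim is where its Python raises.
def pvChainB : Nat → String → Int → Int → List String
  | 0, _, _, _ => []
  | fuel+1, s, step, N =>
    (PySem.Int.ofStr? s).elim [s] (fun v =>            -- none: int(s) raises
      if v > N then [s]
      else
        (PySem.Str.pyGet? s (-1)).elim [s] (fun c =>   -- none: s[-1] raises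
          (PySem.Int.ofChars? [c]).elim [s] (fun d =>  -- none: int(s[-1]) raises
            let newS := PySem.Int.toStr (d + step)
            (PySem.Int.ofStr? newS).elim [s] (fun nv => -- none: unreachable, int(str(x))
              if nv > 9 ∨ nv < 0 then [s]
              else s :: pvChainB fuel (s ++ newS) step N))))

-- Phase 2 of Source B: sum(1 for t in chain if int(t) <= N), a 0/1-sum over the chain,
-- ported as List.countP (the parse-failure branch, where its Python would raise, counts nothing).
def count_number_of_perms_alt (current_str : String) (step_size : Int) (N : Int) : Int :=
  ((pvChainB 64 current_str step_size N).countP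
    (fun t => (PySem.Int.ofStr? t).elim false (fun v => decide (v ≤ N))) : Nat)

-- ===== PRECONDITION & SPEC =====
-- Pre_ excludes exactly the inputs where Python A raises: strings int() rejects (ValueError),
-- and, when int(s) ≤ N, a non-digit last character (ValueError on int(s[-1])) or the
-- non-terminating case step_size = 0 with int(s) ≤ 0 (RecursionError).
def Pre_count_number_of_perms (current_str : String) (step_size : Int) (N : Int) : Prop :=
  (PySem.Int.ofStr? current_str).isSome = true ∧
  ((PySem.Int.ofStr? current_str).getD 0 > N ∨
    (((PySem.Str.pyGet? current_str (-1)).map Char.isDigit).getD false = true ∧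
      (step_size ≠ 0 ∨ 0 < (PySem.Int.ofStr? current_str).getD 0)))
instance (current_str : String) (step_size : Int) (N : Int) : Decidable (Pre_count_number_of_perms current_str step_size N) := by unfold Pre_count_number_of_perms; infer_instance

def pvWitness_count_number_of_perms : String × Int × Int := ("15", 2, 1000)

def Spec_count_number_of_perms (current_str : String) (step_size : Int) (N : Int) (out : Int) : Prop := out = count_number_of_perms_alt current_str step_size N
instance (current_str : String) (step_size : Int) (N : Int) (out : Int) : Decidable (Spec_count_number_of_perms current_str step_size N out) := by unfold Spec_count_number_of_perms; infer_instance

-- ===== CLAIM (what is proved, stated in full; the proofs are below) =====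
def Claim_equal_count_number_of_perms : Prop := ∀ (current_str : String) (step_size : Int) (N : Int), Dom_count_number_of_perms current_str step_size N → Pre_count_number_of_perms current_str step_size N → Spec_count_number_of_perms current_str step_size N (count_number_of_perms current_str step_size N)

-- ===== LEMMAS AND PROOFS =====

-- Counting the chain elements whose parsed value is ≤ N computes A's recursive count, any fuel.
theorem countP_pvChainB_eq_pvCountA (step N : Int) : ∀ (fuel : Nat) (s : String),
    ((pvChainB fuel s step N).countP
      (fun t => (PySem.Int.ofStr? t).elim false (fun v => decide (v ≤ N))) : Int)
      = pvCountA fuel s step N := by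
  intro fuel
  induction fuel with
  | zero => intro s; simp [pvChainB, pvCountA]
  | succ f ih =>
    intro s
    simp only [pvChainB, pvCountA]
    cases hp : PySem.Int.ofStr? s with
    | none => simp [hp]
    | some v =>
      simp only [Option.elim]
      by_cases h : v > N
      · rw [if_pos h, if_pos h]
        simp [hp, not_le.mpr h]
      · rw [if_neg h, if_neg h]
        have hle : v ≤ N := not_lt.mp h
        cases PySem.Str.pyGet? s (-1) with
        | none => simp [hp, hle]
        | some c =>
          simp only []
          cases PySem.Int.ofChars? [c] with
          | none => simp [hp, hle]
          | some d =>
            simp only []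
            cases PySem.Int.ofStr? (PySem.Int.toStr (d + step)) with
            | none => simp [hp, hle]
            | some nv =>
              simp only []
              by_cases h9 : nv > 9
              · rw [if_pos h9, if_pos (Or.inl h9)]
                simp [hp, hle]
              · rw [if_neg h9]
                by_cases h0 : nv < 0
                · rw [if_pos h0, if_pos (Or.inr h0)]
                  simp [hp, hle]
                · rw [if_neg h0, if_neg (show ¬(nv > 9 ∨ nv < 0) by tauto)]
                  rw [List.countP_cons]
                  have h2 := ih (s ++ PySem.Int.toStr (d + step))
                  simp only [Option.elim] at h2
                  simp only [hp, hle, decide_true, if_pos]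
                  push_cast
                  omega

-- ===== VERDICT (by name: the statement is the Claim_ definition above) =====
theorem count_number_of_perms_spec : Claim_equal_count_number_of_perms := by
  intro s step N _ _
  unfold Spec_count_number_of_perms count_number_of_perms count_number_of_perms_alt
  exact (countP_pvChainB_eq_pvCountA step N 64 s).symm
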